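-- pv_equiv track=rewrite | github.com/mozilla-services/socorro | socorro/signature/utils.py | collapse
-- ===== SOURCE A (Python) =====
-- def _is_exception(exceptions, before_token, after_token, token):
--     """Predicate for whether the open token is in an exception context
--
--     :arg exceptions: list of strings or None
--     :arg before_token: the text of the function up to the token delimiter
--     :arg after_token: the text of the function after the token delimiter
--     :arg token: the token (only if we're looking at a close delimiter
--
--     :returns: bool
--
--     """
--     if not exceptions:
--         return False
--     for s in exceptions:
--         if before_token.endswith(s):
--             return True
--         if s in token:
--             return True
--     return False
--
-- def collapse(function, open_string, close_string, replacement="", exceptions=None):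
--     """Collapses the text between two delimiters in a frame function value
--
--     This collapses the text between two delimiters and either removes the text
--     altogether or replaces it with a replacement string.
--
--     There are certain contexts in which we might not want to collapse the text
--     between two delimiters. These are denoted as "exceptions" and collapse will
--     check for those exception strings occuring before the token to be replaced
--     or inside the token to be replaced.
--
--     Before::
--
--         IPC::ParamTraits<nsTSubstring<char> >::Write(IPC::Message *,nsTSubstring<char> const &)
--                ^        ^ open token
--                exception string occurring before open token
--
--     Inside::
--
--         <rayon_core::job::HeapJob<BODY> as rayon_core::job::Job>::execute
--         ^                              ^^^^ exception string inside token
--         open token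
--
--     :arg function: the function value from a frame to collapse tokens in
--     :arg open_string: the open delimiter; e.g. ``(``
--     :arg close_string: the close delimiter; e.g. ``)``
--     :arg replacement: what to replace the token with; e.g. ``<T>``
--     :arg exceptions: list of strings denoting exceptions where we don't want
--         to collapse the token
--
--     :returns: new function string with tokens collapsed
--
--     """
--     collapsed = []
--     open_count = 0
--     open_token = []
--
--     for i, char in enumerate(function):
--         if not open_count:
--             if char == open_string and not _is_exception(
--                 exceptions, function[:i], function[i + 1 :], ""
--             ):
--                 open_count += 1
--                 open_token = [char]
--             else:
--                 collapsed.append(char)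
--
--         else:
--             if char == open_string:
--                 open_count += 1
--                 open_token.append(char)
--
--             elif char == close_string:
--                 open_count -= 1
--                 open_token.append(char)
--
--                 if open_count == 0:
--                     token = "".join(open_token)
--                     if _is_exception(
--                         exceptions, function[:i], function[i + 1 :], token
--                     ):
--                         collapsed.append("".join(open_token))
--                     else:
--                         collapsed.append(replacement)
--                     open_token = []
--             else:
--                 open_token.append(char)
--
--     if open_count:
--         token = "".join(open_token)
--         if _is_exception(exceptions, function[:i], function[i + 1 :], token):
--             collapsed.append("".join(open_token))
--         else:
--             collapsed.append(replacement)
--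
--     return "".join(collapsed)
-- ===== SOURCE B (Python) =====
-- def _has_exception(exceptions, before, token):
--     if not exceptions:
--         return False
--     return any(before.endswith(s) or s in token for s in exceptions)
--
--
-- def collapse(function, open_string, close_string, replacement="", exceptions=None):
--     n = len(function)
--     # Pass 1: record top-level delimited regions as (start, end, keep) triples.
--     regions = []
--     depth = 0
--     start = 0
--     for i, ch in enumerate(function):
--         if depth == 0:
--             if ch == open_string and not _has_exception(exceptions, function[:i], ""):
--                 depth = 1
--                 start = i
--         elif ch == open_string:
--             depth += 1
--         elif ch == close_string:
--             depth -= 1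
--             if depth == 0:
--                 regions.append(
--                     (start, i, _has_exception(exceptions, function[:i], function[start : i + 1]))
--                 )
--     if depth:
--         regions.append(
--             (start, n - 1, _has_exception(exceptions, function[: n - 1], function[start:]))
--         )
--     # Pass 2: stitch the output from slices of the original string.
--     out = []
--     cursor = 0
--     for s, e, keep in regions:
--         out.append(function[cursor:s])
--         out.append(function[s : e + 1] if keep else replacement)
--         cursor = e + 1
--     out.append(function[cursor:])
--     return "".join(out)
-- ===== Notes on version B (the rewrite author's own statement) =====
-- stated objective: alternative
-- what changed: A accumulates output pieces and a character buffer for the current token in a single pass; B first records a table of (start,end,keep) index regions with a depth counter, then renders the result in a second pass by stitching slices of the original string between and inside the recorded regions.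
import Mathlib
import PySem

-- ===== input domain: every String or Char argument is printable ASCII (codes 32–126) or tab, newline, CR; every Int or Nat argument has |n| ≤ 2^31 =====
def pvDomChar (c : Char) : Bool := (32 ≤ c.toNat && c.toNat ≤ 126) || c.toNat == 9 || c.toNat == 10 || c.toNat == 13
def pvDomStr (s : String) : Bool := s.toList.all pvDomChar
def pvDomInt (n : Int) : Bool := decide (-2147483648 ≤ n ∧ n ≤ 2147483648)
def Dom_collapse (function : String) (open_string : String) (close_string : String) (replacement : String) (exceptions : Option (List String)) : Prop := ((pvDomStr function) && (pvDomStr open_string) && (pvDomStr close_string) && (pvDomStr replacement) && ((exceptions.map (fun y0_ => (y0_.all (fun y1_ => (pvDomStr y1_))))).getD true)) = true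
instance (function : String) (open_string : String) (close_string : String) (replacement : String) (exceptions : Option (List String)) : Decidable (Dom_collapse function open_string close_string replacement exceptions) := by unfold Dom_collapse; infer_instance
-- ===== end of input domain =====

-- B replaces A's incremental character-buffer accumulation by a two-pass scheme
-- (first a table of (start,end,keep) index regions, then rendering from slices of
-- the original string); alternative decomposition, same asymptotic cost.


-- ===== PORT A =====
-- `before_token.endswith(s)` = List.isSuffixOf, `s in token` = List.isInfixOf (exact on all inputs).
-- The `for s in exceptions: …` loop of _is_exception, with its early returns:
def isExcLoopA (l : List String) (before token : List Char) : Bool :=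
  match l with
  | [] => false
  | s :: rest =>
    if PySem.Chars.endswith before s.toList then true
    else if PySem.Chars.isIn s.toList token then true
    else isExcLoopA rest before token

-- _is_exception; `after` is passed (as in the Python) but unused by the body.
def isExceptionA (exceptions : Option (List String)) (before after token : List Char) : Bool :=
  match exceptions with
  | none => false
  | some l => if l.isEmpty then false else isExcLoopA l before token

-- the `for i, char in enumerate(function)` loop; state = (collapsed, open_count, open_token);
-- `cs` is the full char list of `function` (for the function[:i] / function[i+1:] slices);
-- single-char `char` is compared with the whole strings open_string/close_string, as in Python.
def loopA (exs : Option (List String)) (os cl repl : List Char) (cs : List Char) :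
    List Char → Nat → (List (List Char) × Int × List Char) → List (List Char) × Int × List Char
  | [], _, st => st
  | c :: rest, i, (acc, cnt, tok) =>
    if cnt == 0 then
      if [c] == os && !(isExceptionA exs (cs.take i) (cs.drop (i + 1)) []) then
        loopA exs os cl repl cs rest (i + 1) (acc, cnt + 1, [c])
      else
        loopA exs os cl repl cs rest (i + 1) (acc ++ [[c]], cnt, tok)
    else
      if [c] == os then
        loopA exs os cl repl cs rest (i + 1) (acc, cnt + 1, tok ++ [c])
      else if [c] == cl then
        if cnt - 1 == 0 then
          if isExceptionA exs (cs.take i) (cs.drop (i + 1)) (tok ++ [c]) then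
            loopA exs os cl repl cs rest (i + 1) (acc ++ [tok ++ [c]], cnt - 1, [])
          else
            loopA exs os cl repl cs rest (i + 1) (acc ++ [repl], cnt - 1, [])
        else
          loopA exs os cl repl cs rest (i + 1) (acc, cnt - 1, tok ++ [c])
      else
        loopA exs os cl repl cs rest (i + 1) (acc, cnt, tok ++ [c])

def collapse (function : String) (open_string : String) (close_string : String) (replacement : String) (exceptions : Option (List String)) : String :=
  let cs := function.toList
  let res := loopA exceptions open_string.toList close_string.toList replacement.toList cs cs 0 ([], 0, [])
  let n := cs.length
  -- the `if open_count:` epilogue; the leftover loop index i is n-1 (open_count ≠ 0 forces n > 0)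
  let acc :=
    if res.2.1 == 0 then res.1
    else if isExceptionA exceptions (cs.take (n - 1)) (cs.drop n) res.2.2 then res.1 ++ [res.2.2]
    else res.1 ++ [replacement.toList]
  String.ofList acc.flatten

-- ===== PORT B =====
-- B's _has_exception: any() over the exception list.
def hasExcB (exceptions : Option (List String)) (before token : List Char) : Bool :=
  match exceptions with
  | none => false
  | some l => l.any (fun s => PySem.Chars.endswith before s.toList || PySem.Chars.isIn s.toList token)

-- function[a:b] for 0 ≤ a ≤ b (the only slices B takes): exact there.
def sliceCC (cs : List Char) (a b : Nat) : List Char := (cs.drop a).take (b - a)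

-- B's pass 1: record (start, end, keep) triples for each top-level delimited region.
def pass1B (exs : Option (List String)) (os cl : List Char) (cs : List Char) :
    List Char → Nat → (List (Nat × Nat × Bool) × Int × Nat) → List (Nat × Nat × Bool) × Int × Nat
  | [], _, st => st
  | c :: rest, i, (regs, d, start) =>
    if d == 0 then
      if [c] == os && !(hasExcB exs (cs.take i) []) then
        pass1B exs os cl cs rest (i + 1) (regs, 1, i)
      else
        pass1B exs os cl cs rest (i + 1) (regs, d, start)
    else if [c] == os then
      pass1B exs os cl cs rest (i + 1) (regs, d + 1, start)
    else if [c] == cl then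
      if d - 1 == 0 then
        pass1B exs os cl cs rest (i + 1)
          (regs ++ [(start, i, hasExcB exs (cs.take i) (sliceCC cs start (i + 1)))], d - 1, start)
      else
        pass1B exs os cl cs rest (i + 1) (regs, d - 1, start)
    else
      pass1B exs os cl cs rest (i + 1) (regs, d, start)

-- B's pass 2: the cursor loop over the regions, then the tail slice.
def pass2B (cs repl : List Char) (regs : List (Nat × Nat × Bool)) : List Char :=
  let st := regs.foldl
    (fun (st : List Char × Nat) r =>
      (st.1 ++ sliceCC cs st.2 r.1 ++ (if r.2.2 then sliceCC cs r.1 (r.2.1 + 1) else repl), r.2.1 + 1))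
    ([], 0)
  st.1 ++ cs.drop st.2

def collapse_alt (function : String) (open_string : String) (close_string : String) (replacement : String) (exceptions : Option (List String)) : String :=
  let cs := function.toList
  let n := cs.length
  let res := pass1B exceptions open_string.toList close_string.toList cs cs 0 ([], 0, 0)
  let regs :=
    if res.2.1 == 0 then res.1
    else res.1 ++ [(res.2.2, n - 1, hasExcB exceptions (cs.take (n - 1)) (cs.drop res.2.2))]
  String.ofList (pass2B cs replacement.toList regs)

-- ===== PRECONDITION & SPEC =====
def Spec_collapse (function : String) (open_string : String) (close_string : String) (replacement : String) (exceptions : Option (List String)) (out : String) : Prop := out = collapse_alt function open_string close_string replacement exceptions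
instance (function : String) (open_string : String) (close_string : String) (replacement : String) (exceptions : Option (List String)) (out : String) : Decidable (Spec_collapse function open_string close_string replacement exceptions out) := by unfold Spec_collapse; infer_instance

-- ===== CLAIM (what is proved, stated in full; the proofs are below) =====
def Claim_equal_collapse : Prop := ∀ (function : String) (open_string : String) (close_string : String) (replacement : String) (exceptions : Option (List String)), Dom_collapse function open_string close_string replacement exceptions → Spec_collapse function open_string close_string replacement exceptions (collapse function open_string close_string replacement exceptions)

-- ===== LEMMAS AND PROOFS =====

-- the two exception predicates agree
theorem isExc_eq (exs : Option (List String)) (before after token : List Char) :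
    isExceptionA exs before after token = hasExcB exs before token := by
  cases exs with
  | none => rfl
  | some l =>
    simp only [isExceptionA, hasExcB]
    induction l with
    | nil => simp
    | cons s rest ih =>
      simp only [List.isEmpty_cons, isExcLoopA, List.any_cons]
      by_cases h1 : PySem.Chars.endswith before s.toList = true
      · simp [h1]
      · by_cases h2 : PySem.Chars.isIn s.toList token = true
        · simp [h1, h2]
        · simp only [if_neg h1, if_neg h2, Bool.not_eq_true] at *
          simp only [h1, h2, Bool.false_or]
          cases rest with
          | nil => simp [isExcLoopA]
          | cons t r => simpa [isExcLoopA] using ih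

-- proof-friendly recursive rendering of a region table with cursor c up to index `stop`
def rend (cs repl : List Char) : List (Nat × Nat × Bool) → Nat → Nat → List Char
  | [], c, stop => sliceCC cs c stop
  | (s, e, k) :: rest, c, stop =>
    sliceCC cs c s ++ (if k then sliceCC cs s (e + 1) else repl) ++ rend cs repl rest (e + 1) stop

-- well-formed region table with lower cursor bound c
def WFr : List (Nat × Nat × Bool) → Nat → Prop
  | [], _ => True
  | (s, e, _) :: rest, c => c ≤ s ∧ s ≤ e ∧ WFr rest (e + 1)

-- cursor after rendering the table
def regEnd : List (Nat × Nat × Bool) → Nat → Nat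
  | [], c => c
  | (_, e, _) :: rest, _ => regEnd rest (e + 1)

theorem sliceCC_self (cs : List Char) (c : Nat) : sliceCC cs c c = [] := by
  simp [sliceCC]

theorem sliceCC_full (cs : List Char) (c : Nat) : sliceCC cs c cs.length = cs.drop c := by
  simp only [sliceCC]
  exact List.take_of_length_le (by simp)

theorem sliceCC_succ (cs : List Char) (c stop : Nat) (h1 : c ≤ stop) (h2 : stop < cs.length) :
    sliceCC cs c (stop + 1) = sliceCC cs c stop ++ [cs[stop]] := by
  simp only [sliceCC]
  rw [Nat.succ_sub h1, List.take_add_one]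
  have h3 : (cs.drop c)[stop - c]? = some cs[stop] := by
    rw [List.getElem?_drop]
    have h4 : c + (stop - c) = stop := by omega
    rw [h4, List.getElem?_eq_getElem h2]
  simp [h3]

theorem pass2B_eq_rend (cs repl : List Char) (regs : List (Nat × Nat × Bool)) :
    pass2B cs repl regs = rend cs repl regs 0 cs.length := by
  suffices h : ∀ regs (out : List Char) (c : Nat),
      (let st := regs.foldl
        (fun (st : List Char × Nat) r =>
          (st.1 ++ sliceCC cs st.2 r.1 ++ (if r.2.2 then sliceCC cs r.1 (r.2.1 + 1) else repl), r.2.1 + 1))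
        (out, c)
       st.1 ++ cs.drop st.2) = out ++ rend cs repl regs c cs.length by
    simpa [pass2B] using h regs [] 0
  intro regs
  induction regs with
  | nil => intro out c; simp [rend, sliceCC_full]
  | cons r rest ih =>
    intro out c
    obtain ⟨s, e, k⟩ := r
    simp only [List.foldl_cons, rend]
    rw [ih]
    simp

theorem WFr_append (regs : List (Nat × Nat × Bool)) (c s e : Nat) (k : Bool)
    (h : WFr regs c) (h2 : regEnd regs c ≤ s) (h3 : s ≤ e) :
    WFr (regs ++ [(s, e, k)]) c := by
  induction regs generalizing c with
  | nil => exact ⟨h2, h3, trivial⟩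
  | cons r rest ih =>
    obtain ⟨s', e', k'⟩ := r
    exact ⟨h.1, h.2.1, ih (e' + 1) h.2.2 h2⟩

theorem regEnd_append (regs : List (Nat × Nat × Bool)) (c s e : Nat) (k : Bool) :
    regEnd (regs ++ [(s, e, k)]) c = e + 1 := by
  induction regs generalizing c with
  | nil => rfl
  | cons r rest ih => obtain ⟨s', e', k'⟩ := r; exact ih (e' + 1)

theorem rend_succ (cs repl : List Char) (regs : List (Nat × Nat × Bool)) (c stop : Nat)
    (hw : WFr regs c) (he : regEnd regs c ≤ stop) (hn : stop < cs.length) :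
    rend cs repl regs c (stop + 1) = rend cs repl regs c stop ++ [cs[stop]] := by
  induction regs generalizing c with
  | nil => exact sliceCC_succ cs c stop he hn
  | cons r rest ih =>
    obtain ⟨s, e, k⟩ := r
    simp only [rend]
    rw [ih (e + 1) hw.2.2 he]
    simp

theorem rend_append (cs repl : List Char) (regs : List (Nat × Nat × Bool)) (c s e stop : Nat) (k : Bool)
    (hw : WFr regs c) (he : regEnd regs c ≤ s) :
    rend cs repl (regs ++ [(s, e, k)]) c stop =
      rend cs repl regs c s ++ (if k then sliceCC cs s (e + 1) else repl) ++ sliceCC cs (e + 1) stop := by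
  induction regs generalizing c with
  | nil => simp [rend]
  | cons r rest ih =>
    obtain ⟨s', e', k'⟩ := r
    simp only [List.cons_append, rend]
    rw [ih (e' + 1) hw.2.2 he]
    simp

-- the element at index i, read off from a drop equation
theorem getElem_of_drop {cs : List Char} {i : Nat} {c : Char} {r : List Char}
    (h : cs.drop i = c :: r) (hi : i < cs.length) : cs[i] = c := by
  have := List.drop_eq_getElem_cons hi
  rw [h] at this
  exact (List.cons.injEq .. ▸ this).1.symm

-- MAIN COUPLING INVARIANT
theorem main_lemma (exs : Option (List String)) (os cl repl : List Char) (cs : List Char) :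
    ∀ (r : List Char) (i : Nat) (acc : List (List Char)) (cnt : Int) (tok : List Char)
      (regs : List (Nat × Nat × Bool)) (d : Int) (start : Nat),
      cs.drop i = r → i ≤ cs.length → cnt = d → 0 ≤ d → WFr regs 0 →
      (d = 0 → tok = [] ∧ acc.flatten = rend cs repl regs 0 i ∧ regEnd regs 0 ≤ i) →
      (d ≠ 0 → start ≤ i ∧ start < cs.length ∧ acc.flatten = rend cs repl regs 0 start ∧
        regEnd regs 0 ≤ start ∧ tok = sliceCC cs start i) →
      (let res := loopA exs os cl repl cs r i (acc, cnt, tok)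
       let accf :=
        if res.2.1 == 0 then res.1
        else if isExceptionA exs (cs.take (cs.length - 1)) (cs.drop cs.length) res.2.2 then res.1 ++ [res.2.2]
        else res.1 ++ [repl]
       accf.flatten)
      =
      (let resB := pass1B exs os cl cs r i (regs, d, start)
       let regsf :=
        if resB.2.1 == 0 then resB.1
        else resB.1 ++ [(resB.2.2, cs.length - 1,
          hasExcB exs (cs.take (cs.length - 1)) (cs.drop resB.2.2))]
       pass2B cs repl regsf) := by
  intro r
  induction r with
  | nil =>
    intro i acc cnt tok regs cnt0 start hdrop hin hcd hd0 hwf hph0 hph1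
    subst hcd
    have hieq : i = cs.length := by
      have h := List.drop_eq_nil_iff.mp hdrop
      omega
    simp only [loopA, pass1B, isExc_eq]
    by_cases hdz : cnt = 0
    · subst hdz
      obtain ⟨htok, hacc, hre⟩ := hph0 rfl
      have h00 : ((0:Int) == 0) = true := rfl
      rw [if_pos h00, if_pos h00, pass2B_eq_rend, ← hieq, hacc]
    · obtain ⟨hsi, hsn, hacc, hre, htok⟩ := hph1 hdz
      have hnot : ¬((cnt == 0) = true) := by simpa using hdz
      rw [if_neg hnot, if_neg hnot, pass2B_eq_rend]
      have htokv : tok = cs.drop start := by rw [htok, hieq, sliceCC_full]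
      have hn1 : cs.length - 1 + 1 = cs.length := by omega
      rw [rend_append cs repl regs 0 start (cs.length - 1) cs.length _ hwf hre, hn1,
        sliceCC_self, htokv]
      by_cases hk : hasExcB exs (cs.take (cs.length - 1)) (cs.drop start) = true
      · rw [if_pos hk, if_pos hk]
        simp [hacc, sliceCC_full]
      · rw [if_neg hk, if_neg hk]
        simp [hacc]
  | cons c rest ih =>
    intro i acc cnt tok regs cnt0 start hdrop hin hcd hd0 hwf hph0 hph1
    subst hcd
    have hi : i < cs.length := by
      have h := congrArg List.length hdrop
      simp at h
      omega
    have hc : cs[i] = c := getElem_of_drop hdrop hi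
    have hdrop' : cs.drop (i + 1) = rest := by
      have h1 : cs.drop (i + 1) = (cs.drop i).drop 1 := by
        rw [List.drop_drop]
      rw [h1, hdrop]
      rfl
    simp only [loopA, pass1B, isExc_eq]
    by_cases hdz : cnt = 0
    · subst hdz
      obtain ⟨htok, hacc, hre⟩ := hph0 rfl
      subst htok
      have h00 : ((0:Int) == 0) = true := rfl
      rw [if_pos h00, if_pos h00]
      by_cases hcond : ([c] == os && !hasExcB exs (cs.take i) []) = true
      · rw [if_pos hcond, if_pos hcond]
        have key := ih (i + 1) acc (0 + 1) [c] regs 1 i hdrop' (by omega) (by norm_num)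
          (by norm_num) hwf (by intro h; norm_num at h)
          (by intro _; refine ⟨by omega, hi, hacc, hre, ?_⟩; simp [sliceCC, hdrop])
        simpa only [isExc_eq] using key
      · rw [if_neg hcond, if_neg hcond]
        have key := ih (i + 1) (acc ++ [[c]]) 0 [] regs 0 start hdrop' (by omega) rfl le_rfl hwf
          (by intro _
              refine ⟨rfl, ?_, by omega⟩
              rw [rend_succ cs repl regs 0 i hwf hre hi, hc]
              simp [hacc])
          (by intro h; exact absurd rfl h)
        simpa only [isExc_eq] using key
    · obtain ⟨hsi, hsn, hacc, hre, htok⟩ := hph1 hdz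
      have hnot : ¬((cnt == 0) = true) := by simpa using hdz
      rw [if_neg hnot, if_neg hnot]
      have htokc : tok ++ [c] = sliceCC cs start (i + 1) := by
        rw [sliceCC_succ cs start i hsi hi, ← htok, hc]
      by_cases hos : ([c] == os) = true
      · rw [if_pos hos, if_pos hos]
        have key := ih (i + 1) acc (cnt + 1) (tok ++ [c]) regs (cnt + 1) start hdrop' (by omega) rfl
          (by omega) hwf (by intro h; omega)
          (by intro _; exact ⟨by omega, hsn, hacc, hre, htokc⟩)
        simpa only [isExc_eq] using key
      · rw [if_neg hos, if_neg hos]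
        by_cases hcl : ([c] == cl) = true
        · rw [if_pos hcl, if_pos hcl]
          by_cases hd1 : ((cnt - 1 : Int) == 0) = true
          · have hd1' : cnt = 1 := by
              have := beq_iff_eq.mp hd1
              omega
            rw [if_pos hd1, if_pos hd1, htokc]
            have hwf' : WFr (regs ++ [(start, i, hasExcB exs (cs.take i) (sliceCC cs start (i + 1)))]) 0 :=
              WFr_append regs 0 start i _ hwf hre (by omega)
            have hre' : regEnd (regs ++ [(start, i, hasExcB exs (cs.take i) (sliceCC cs start (i + 1)))]) 0 = i + 1 :=
              regEnd_append regs 0 start i _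
            have hrend : rend cs repl (regs ++ [(start, i, hasExcB exs (cs.take i) (sliceCC cs start (i + 1)))]) 0 (i + 1)
                = acc.flatten ++ (if hasExcB exs (cs.take i) (sliceCC cs start (i + 1)) then sliceCC cs start (i + 1) else repl) := by
              rw [rend_append cs repl regs 0 start i (i + 1) _ hwf hre, sliceCC_self, hacc]
              simp
            by_cases hk : hasExcB exs (cs.take i) (sliceCC cs start (i + 1)) = true
            · rw [if_pos hk]
              have key := ih (i + 1) (acc ++ [sliceCC cs start (i + 1)]) (cnt - 1) []
                (regs ++ [(start, i, hasExcB exs (cs.take i) (sliceCC cs start (i + 1)))]) (cnt - 1) start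
                hdrop' (by omega) rfl (by omega) hwf'
                (by intro _
                    refine ⟨rfl, ?_, by omega⟩
                    rw [hrend, if_pos hk]
                    simp)
                (by intro h; exact absurd (beq_iff_eq.mp hd1) h)
              simpa only [isExc_eq] using key
            · rw [if_neg hk]
              have key := ih (i + 1) (acc ++ [repl]) (cnt - 1) []
                (regs ++ [(start, i, hasExcB exs (cs.take i) (sliceCC cs start (i + 1)))]) (cnt - 1) start
                hdrop' (by omega) rfl (by omega) hwf'
                (by intro _
                    refine ⟨rfl, ?_, by omega⟩
                    rw [hrend, if_neg hk]
                    simp)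
                (by intro h; exact absurd (beq_iff_eq.mp hd1) h)
              simpa only [isExc_eq] using key
          · rw [if_neg hd1, if_neg hd1]
            have hdm : (cnt - 1 : Int) ≠ 0 := by
              intro h
              exact hd1 (beq_iff_eq.mpr h)
            have key := ih (i + 1) acc (cnt - 1) (tok ++ [c]) regs (cnt - 1) start hdrop' (by omega) rfl
              (by omega) hwf (by intro h; omega)
              (by intro _; exact ⟨by omega, hsn, hacc, hre, htokc⟩)
            simpa only [isExc_eq] using key
        · rw [if_neg hcl, if_neg hcl]
          have key := ih (i + 1) acc cnt (tok ++ [c]) regs cnt start hdrop' (by omega) rfl (by omega) hwf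
            (by intro h; exact absurd h hdz)
            (by intro _; exact ⟨by omega, hsn, hacc, hre, htokc⟩)
          simpa only [isExc_eq] using key

-- ===== VERDICT (by name: the statement is the Claim_ definition above) =====
theorem collapse_spec : Claim_equal_collapse := by
  intro function open_string close_string replacement exceptions _
  unfold Spec_collapse collapse collapse_alt
  have h := main_lemma exceptions open_string.toList close_string.toList replacement.toList
    function.toList function.toList 0 [] 0 [] [] 0 0 rfl (by simp) rfl le_rfl trivial
    (fun _ => ⟨rfl, by simp [rend, sliceCC], by simp [regEnd]⟩) (fun h => absurd rfl h)
  simp only at h ⊢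
  rw [h]
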